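-- pv_equiv track=rewrite | github.com/iyer-karthik/coding_exercises | palindrome_dates.py | palindrome_count
-- ===== SOURCE A (Python) =====
-- def is_leap(year):
--     """
--         :type year: int; 1000 <= year <= 9999
--         :rtype: int
--     """
--     if year % 4 == 0 and year % 400 != 0:
--         return True
--     else:
--         return False
--
-- def is_palindrome(date):
--     return date == date[::-1]
--
-- def palindrome_count(year):
--     century = year - year % 100
--     palindrome_count = 0
--
--     if is_leap(year):
--         days_of_month = [31, 29, 31, 30, 31, 30, 31, 31, 30, 31, 30, 31]
--     else:
--         days_of_month = [31, 28, 31, 30, 31, 30, 31, 31, 30, 31, 30, 31]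
--
--     for month in range(0,12):
--         for day in range(1, days_of_month[month] + 1):
--             for year in range(century, century + 100):
--                 if 1 <= day <= 9:
--                      day_str = '0' + str(day)
--                 else:
--                      day_str = str(day)
--
--                 date_str = str(month + 1) + day_str + str(year)
--
--                 if is_palindrome(date_str):
--                     palindrome_count +=  1
--                 elif  not is_palindrome(date_str) and len(date_str) == 7:
--                     date_str = '0' + date_str
--                     if is_palindrome(date_str):
--                         palindrome_count +=  1
--
--     return palindrome_count
-- ===== SOURCE B (Python) =====
-- def palindrome_count(year):
--     # Instead of scanning all 100 years of the century for every date, test only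
--     # the candidate years that could close the palindrome: a palindrome date
--     # string must END with the mirror of its first one or two characters, which
--     # pins the year to at most two values per century.
--     century = year - year % 100
--     leap = year % 4 == 0 and year % 400 != 0
--     days_of_month = [31, 29 if leap else 28, 31, 30, 31, 30, 31, 31, 30, 31, 30, 31]
--     count = 0
--     for month in range(1, 13):
--         for day in range(1, days_of_month[month - 1] + 1):
--             dd = str(day) if day >= 10 else '0' + str(day)
--             base = str(month) + dd
--             # first two digits of the date string
--             u0, u1 = (month, day // 10) if month < 10 else (month // 10, month % 10)
--             y1 = century + u0            # year mirroring the first character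
--             y2 = century + 10 * u1 + u0  # year mirroring the first two characters
--             s = base + str(y1)
--             if s == s[::-1]:
--                 count += 1
--             if y2 != y1:
--                 s = base + str(y2)
--                 if s == s[::-1]:
--                     count += 1
--             # a seven-character date string is also tried with a leading zero,
--             # which pins the year to end in the month's first digit then 0
--             s = base + str(century + 10 * u0)
--             if len(s) == 7:
--                 s = '0' + s
--                 if s == s[::-1]:
--                     count += 1
--     return count
-- ===== Notes on version B (the rewrite author's own statement) =====
-- stated objective: faster
-- what changed: A tests every (month, day, year) date string of the century (~36600 palindrome checks); B visits each (month, day) once and tests only the one or two candidate years whose final digits mirror the date string's first characters (plus the zero-padded candidate for seven-character dates), removing the inner 100-iteration year loop; Pre_ excludes negative years, where A's counts come from palindrome tests of strings containing the '-' sign of str(year) and are accidental.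
-- outside the precondition, e.g. on palindrome_count(-150): A returns 32, B returns 0; on palindrome_count(-1000): A returns 27, B returns 0
import Mathlib
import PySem

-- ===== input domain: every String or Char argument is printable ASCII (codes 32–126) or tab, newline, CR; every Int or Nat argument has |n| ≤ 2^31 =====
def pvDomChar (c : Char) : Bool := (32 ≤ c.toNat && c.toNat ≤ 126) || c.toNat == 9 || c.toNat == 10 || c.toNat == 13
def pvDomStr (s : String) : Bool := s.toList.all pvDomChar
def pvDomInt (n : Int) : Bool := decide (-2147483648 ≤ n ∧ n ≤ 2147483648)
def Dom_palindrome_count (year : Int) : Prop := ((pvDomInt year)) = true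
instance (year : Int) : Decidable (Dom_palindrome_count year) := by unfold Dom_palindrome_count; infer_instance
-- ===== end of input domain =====

-- B replaces A's innermost 100-iteration year loop by, per (month, day), palindrome checks of
-- the one or two candidate date strings whose year mirrors the string's start (objective: faster).

-- ===== PORT A =====
def is_leap (year : Int) : Bool :=
  if PySem.Int.mod year 4 == 0 && PySem.Int.mod year 400 != 0 then true else false

def is_palindrome (date : List Char) : Bool := date == date.reverse

def pcInner (century m day acc : Int) : Int :=
  (PySem.List.pyRange century (century + 100)).foldl (fun acc year =>
    let day_str := if 1 ≤ day && day ≤ 9 then '0' :: PySem.Int.toChars day else PySem.Int.toChars day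
    let date_str := PySem.Int.toChars m ++ day_str ++ PySem.Int.toChars year
    if is_palindrome date_str then acc + 1
    else if !is_palindrome date_str && PySem.List.len date_str == 7 then
      (let date_str := '0' :: date_str
       if is_palindrome date_str then acc + 1 else acc)
    else acc) acc

def palindrome_count (year : Int) : Int :=
  let century := year - PySem.Int.mod year 100
  let days_of_month : List Int :=
    if is_leap year then [31, 29, 31, 30, 31, 30, 31, 31, 30, 31, 30, 31]
    else [31, 28, 31, 30, 31, 30, 31, 31, 30, 31, 30, 31]
  (PySem.List.pyRange 0 12).foldl (fun acc month =>
    (PySem.List.pyRange 1 (PySem.List.pyGetD days_of_month month 0 + 1)).foldl (fun acc day =>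
      pcInner century (month + 1) day acc) acc) 0

-- ===== PORT B =====
def palindrome_count_alt (year : Int) : Int :=
  let century := year - PySem.Int.mod year 100
  let leap := PySem.Int.mod year 4 == 0 && PySem.Int.mod year 400 != 0
  let days_of_month : List Int := [31, if leap then 29 else 28, 31, 30, 31, 30, 31, 31, 30, 31, 30, 31]
  (PySem.List.pyRange 1 13).foldl (fun acc month =>
    (PySem.List.pyRange 1 (PySem.List.pyGetD days_of_month (month - 1) 0 + 1)).foldl (fun acc day =>
      let dd := if day ≥ 10 then PySem.Int.toChars day else '0' :: PySem.Int.toChars day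
      let base := PySem.Int.toChars month ++ dd
      let u := if month < 10 then (month, PySem.Int.floordiv day 10)
               else (PySem.Int.floordiv month 10, PySem.Int.mod month 10)
      let y1 := century + u.1
      let y2 := century + 10 * u.2 + u.1
      let s1 := base ++ PySem.Int.toChars y1
      let acc := if s1 == s1.reverse then acc + 1 else acc   -- s == s[::-1] ([::-1] is reverse)
      let acc := if y2 != y1 then
          (let s2 := base ++ PySem.Int.toChars y2
           if s2 == s2.reverse then acc + 1 else acc)
        else acc
      let s3 := base ++ PySem.Int.toChars (century + 10 * u.1)
      if PySem.List.len s3 == 7 then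
        (let s4 := '0' :: s3
         if s4 == s4.reverse then acc + 1 else acc)
      else acc) acc) 0

-- ===== PRECONDITION & SPEC =====
-- Pre_ excludes negative years, on which A still returns a value but one produced by palindrome
-- tests of strings carrying the '-' sign of str(year) — an accident of A's string handling
-- rather than a calendrical count; B's candidate-year derivation assumes non-negative years.
def Pre_palindrome_count (year : Int) : Prop := 0 ≤ year
instance (year : Int) : Decidable (Pre_palindrome_count year) := by unfold Pre_palindrome_count; infer_instance
def pvWitness_palindrome_count : Int := 2021

def Spec_palindrome_count (year : Int) (out : Int) : Prop := out = palindrome_count_alt year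
instance (year : Int) (out : Int) : Decidable (Spec_palindrome_count year out) := by unfold Spec_palindrome_count; infer_instance

-- ===== CLAIM (what is proved, stated in full; the proofs are below) =====
def Claim_equal_palindrome_count : Prop := ∀ (year : Int), Dom_palindrome_count year → Pre_palindrome_count year → Spec_palindrome_count year (palindrome_count year)

-- ===== LEMMAS AND PROOFS =====
def dg (n : Nat) : Char := Nat.digitChar n

def condA (m d y : Int) : Bool :=
  let day_str := if 1 ≤ d && d ≤ 9 then '0' :: PySem.Int.toChars d else PySem.Int.toChars d
  let s := PySem.Int.toChars m ++ day_str ++ PySem.Int.toChars y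
  is_palindrome s || (!is_palindrome s && PySem.List.len s == 7 && is_palindrome ('0' :: s))

def myDigits (n : Nat) : List Char :=
  if n < 10 then [dg n] else myDigits (n / 10) ++ [dg (n % 10)]
decreasing_by exact Nat.div_lt_self (by omega) (by omega)

theorem myDigits_lt (n : Nat) (h : n < 10) : myDigits n = [dg n] := by
  rw [myDigits, if_pos h]

theorem myDigits_ge (n : Nat) (h : 10 ≤ n) : myDigits n = myDigits (n / 10) ++ [dg (n % 10)] := by
  rw [myDigits, if_neg (by omega)]

theorem toDigitsCore_eq : ∀ (fuel n : Nat) (ds : List Char), n < fuel →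
    Nat.toDigitsCore 10 fuel n ds = myDigits n ++ ds := by
  intro fuel
  induction fuel with
  | zero => intro n ds h; omega
  | succ f ih =>
    intro n ds h
    rw [Nat.toDigitsCore]
    by_cases h0 : n / 10 = 0
    · have hn : n < 10 := by omega
      have hm : n % 10 = n := by omega
      simp only [h0, if_pos rfl, hm, myDigits_lt n hn]
      rfl
    · have h10 : 10 ≤ n := by omega
      simp only [if_neg h0]
      rw [ih (n / 10) _ (by omega), myDigits_ge n h10, List.append_assoc]
      rfl

theorem toDigits_eq (n : Nat) : Nat.toDigits 10 n = myDigits n := by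
  rw [Nat.toDigits, toDigitsCore_eq (n+1) n [] (by omega), List.append_nil]

theorem toChars_natCast (n : Nat) : PySem.Int.toChars ((n : Nat) : Int) = myDigits n := by
  simp [PySem.Int.toChars, toDigits_eq]

theorem myDigits_century (q k : Nat) (hq : 1 ≤ q) (hk : k < 100) :
    myDigits (100*q+k) = myDigits q ++ [dg (k/10), dg (k%10)] := by
  rw [myDigits_ge (100*q+k) (by omega)]
  have e1 : (100*q+k) / 10 = 10*q + k/10 := by omega
  have e2 : (100*q+k) % 10 = k % 10 := by omega
  rw [e1, e2, myDigits_ge (10*q + k/10) (by omega)]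
  have e3 : (10*q + k/10) / 10 = q := by omega
  have e4 : (10*q + k/10) % 10 = k / 10 := by omega
  rw [e3, e4]
  simp

theorem len_myDigits_le (k : Nat) (hk : k < 100) : (myDigits k).length ≤ 2 := by
  by_cases h : k < 10
  · rw [myDigits_lt k h]; simp
  · rw [myDigits_ge k (by omega), myDigits_lt (k/10) (by omega)]; simp

theorem day2A (D : Nat) (h1 : 1 ≤ D) (h2 : D ≤ 31) :
    (if 1 ≤ (D:Int) && (D:Int) ≤ 9 then '0' :: PySem.Int.toChars (D:Int) else PySem.Int.toChars (D:Int))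
      = [dg (D/10), dg (D%10)] := by
  rw [toChars_natCast]
  by_cases h9 : D ≤ 9
  · have c1 : (1 ≤ (D:Int) && (D:Int) ≤ 9) = true := by
      simp only [Bool.and_eq_true, decide_eq_true_eq]; omega
    rw [c1, if_pos rfl, myDigits_lt D (by omega)]
    have e1 : D / 10 = 0 := by omega
    have e2 : D % 10 = D := by omega
    rw [e1, e2]
    exact congrArg (· :: [dg D]) (by decide)
  · have c1 : (1 ≤ (D:Int) && (D:Int) ≤ 9) = false := by
      simp only [Bool.and_eq_false_iff, decide_eq_false_iff_not]; omega
    rw [c1, if_neg (by simp), myDigits_ge D (by omega), myDigits_lt (D/10) (by omega)]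
    rfl

theorem day2B (D : Nat) (h1 : 1 ≤ D) (h2 : D ≤ 31) :
    (if (D:Int) ≥ 10 then PySem.Int.toChars (D:Int) else '0' :: PySem.Int.toChars (D:Int))
      = [dg (D/10), dg (D%10)] := by
  rw [toChars_natCast]
  by_cases h10 : 10 ≤ D
  · rw [if_pos (by exact_mod_cast h10), myDigits_ge D h10, myDigits_lt (D/10) (by omega)]
    rfl
  · rw [if_neg (by push_cast; omega), myDigits_lt D (by omega)]
    have e1 : D / 10 = 0 := by omega
    have e2 : D % 10 = D := by omega
    rw [e1, e2]
    exact congrArg (· :: [dg D]) (by decide)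

theorem pal_pin (c0 c1 : Char) (t : List Char) (a b : Char)
    (h : is_palindrome ((c0 :: c1 :: t) ++ [a, b]) = true) : b = c0 ∧ a = c1 := by
  have h' : (c0 :: c1 :: t) ++ [a, b] = ((c0 :: c1 :: t) ++ [a, b]).reverse := by
    simpa [is_palindrome] using h
  rw [List.reverse_append] at h'
  simp only [List.reverse_cons, List.reverse_nil, List.nil_append, List.cons_append,
    List.append_assoc, List.cons.injEq] at h'
  exact ⟨h'.1.symm, h'.2.1.symm⟩

theorem pal_pin1 (c0 : Char) (t : List Char) (a : Char)
    (h : is_palindrome ((c0 :: t) ++ [a]) = true) : a = c0 := by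
  have h' : (c0 :: t) ++ [a] = ((c0 :: t) ++ [a]).reverse := by
    simpa [is_palindrome] using h
  rw [List.reverse_append] at h'
  simp only [List.reverse_cons, List.reverse_nil, List.nil_append, List.cons_append,
    List.append_assoc, List.cons.injEq] at h'
  exact h'.1.symm

theorem dg_inj : ∀ a : Nat, a < 10 → ∀ b : Nat, b < 10 → dg a = dg b → a = b := by decide

theorem countP_pin (p : Nat → Bool) : ∀ (n K : Nat), K < n → (∀ k, k < n → p k = true → k = K) →
    (List.range n).countP p = if p K then 1 else 0 := by
  intro n
  induction n with
  | zero => intro K h; omega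
  | succ m ih =>
    intro K hK hpin
    rw [List.range_succ, List.countP_append]
    by_cases hKm : K = m
    · subst hKm
      have h0 : (List.range K).countP p = 0 := by
        apply List.countP_eq_zero.mpr
        intro k hk hpk
        have := hpin k (by simp at hk; omega) hpk
        simp at hk; omega
      rw [h0]
      simp [List.countP_cons]
    · have hpm : p m = false := by
        by_contra hc
        have := hpin m (by omega) (by revert hc; cases p m <;> simp)
        omega
      rw [ih K (by omega) (fun k hk hpk => hpin k (by omega) hpk)]
      simp [List.countP_cons, hpm]

theorem countP_disjoint (p r : Nat → Bool) : ∀ (l : List Nat),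
    (∀ k ∈ l, ¬(p k = true ∧ r k = true)) →
    l.countP (fun k => p k || r k) = l.countP p + l.countP r := by
  intro l
  induction l with
  | nil => simp
  | cons x xs ih =>
    intro h
    simp only [List.countP_cons]
    rw [ih (fun k hk => h k (List.mem_cons_of_mem x hk))]
    have hx := h x (List.mem_cons_self)
    cases hp : p x <;> cases hr : r x <;> simp_all <;> omega

theorem beq_decide (a b : Int) : (a == b) = decide (a = b) := by
  by_cases h : a = b
  · subst h; simp
  · rw [beq_eq_false_iff_ne.mpr h, decide_eq_false h]

theorem natCast_beq7 (n : Nat) : (((n : Nat) : Int) == (7 : Int)) = decide (n = 7) := by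
  rw [beq_decide]; exact decide_eq_decide.mpr (by omega)

theorem cond_eval (M D Q k : Nat) (hm1 : 1 ≤ M) (hm2 : M ≤ 12) (hd1 : 1 ≤ D) (hd2 : D ≤ 31)
    (hq : 1 ≤ Q) (hk : k < 100) :
    condA (M:Int) (D:Int) ((100*Q+k : Nat) : Int) =
      (is_palindrome ((myDigits M ++ ([dg (D/10), dg (D%10)] ++ myDigits Q)) ++ [dg (k/10), dg (k%10)]) ||
       (!is_palindrome ((myDigits M ++ ([dg (D/10), dg (D%10)] ++ myDigits Q)) ++ [dg (k/10), dg (k%10)]) &&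
        decide ((myDigits M ++ ([dg (D/10), dg (D%10)] ++ myDigits Q)).length + 2 = 7) &&
        is_palindrome (('0' :: (myDigits M ++ ([dg (D/10), dg (D%10)] ++ myDigits Q))) ++ [dg (k/10), dg (k%10)]))) := by
  have hy : PySem.Int.toChars ((100*Q+k : Nat) : Int) = myDigits Q ++ [dg (k/10), dg (k%10)] := by
    rw [toChars_natCast, myDigits_century Q k hq hk]
  simp only [condA]
  rw [day2A D hd1 hd2, hy, toChars_natCast M]
  have hlen : PySem.List.len (myDigits M ++ [dg (D/10), dg (D%10)] ++ (myDigits Q ++ [dg (k/10), dg (k%10)]))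
      = (((myDigits M ++ ([dg (D/10), dg (D%10)] ++ myDigits Q)).length + 2 : Nat) : Int) := by
    simp [PySem.List.len_eq]; push_cast; ring
  rw [hlen, natCast_beq7]
  have hassoc : myDigits M ++ [dg (D/10), dg (D%10)] ++ (myDigits Q ++ [dg (k/10), dg (k%10)])
      = (myDigits M ++ ([dg (D/10), dg (D%10)] ++ myDigits Q)) ++ [dg (k/10), dg (k%10)] := by
    simp [List.append_assoc]
  rw [hassoc]
  simp [List.cons_append]

theorem cond_eval0 (M D k : Nat) (hm1 : 1 ≤ M) (hm2 : M ≤ 12) (hd1 : 1 ≤ D) (hd2 : D ≤ 31)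
    (hk : k < 100) :
    condA (M:Int) (D:Int) ((k : Nat) : Int) =
      (is_palindrome ((myDigits M ++ [dg (D/10), dg (D%10)]) ++ myDigits k) ||
       (!is_palindrome ((myDigits M ++ [dg (D/10), dg (D%10)]) ++ myDigits k) &&
        decide ((myDigits M ++ [dg (D/10), dg (D%10)]).length + (myDigits k).length = 7) &&
        is_palindrome ('0' :: ((myDigits M ++ [dg (D/10), dg (D%10)]) ++ myDigits k)))) := by
  simp only [condA]
  rw [day2A D hd1 hd2, toChars_natCast k, toChars_natCast M]
  have hlen : PySem.List.len (myDigits M ++ [dg (D/10), dg (D%10)] ++ myDigits k)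
      = (((myDigits M ++ [dg (D/10), dg (D%10)]).length + (myDigits k).length : Nat) : Int) := by
    simp [PySem.List.len_eq]
    push_cast
    omega
  rw [hlen, natCast_beq7]

theorem count_core (u0 u1 : Nat) (h0 : u0 < 10) (h1 : u1 < 10) (h0n : u0 ≠ 0) (t : List Char) :
    (List.range 100).countP (fun k =>
      (is_palindrome ((dg u0 :: dg u1 :: t) ++ [dg (k/10), dg (k%10)]) ||
       (!is_palindrome ((dg u0 :: dg u1 :: t) ++ [dg (k/10), dg (k%10)]) &&
        decide ((dg u0 :: dg u1 :: t).length + 2 = 7) &&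
        is_palindrome (('0' :: dg u0 :: dg u1 :: t) ++ [dg (k/10), dg (k%10)]))))
    = ((if is_palindrome ((dg u0 :: dg u1 :: t) ++ [dg u1, dg u0]) then 1 else 0) +
       (if (dg u0 :: dg u1 :: t).length = 5 then
          (if is_palindrome (('0' :: dg u0 :: dg u1 :: t) ++ [dg u0, dg 0]) then 1 else 0) else 0)) := by
  have pinU : ∀ k, k < 100 →
      is_palindrome ((dg u0 :: dg u1 :: t) ++ [dg (k/10), dg (k%10)]) = true → k = 10*u1 + u0 := by
    intro k hk hp
    obtain ⟨hb, ha⟩ := pal_pin _ _ _ _ _ hp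
    have e1 := dg_inj (k%10) (by omega) u0 h0 hb
    have e2 := dg_inj (k/10) (by omega) u1 h1 ha
    omega
  have pinP : ∀ k, k < 100 →
      is_palindrome (('0' :: dg u0 :: dg u1 :: t) ++ [dg (k/10), dg (k%10)]) = true → k = 10*u0 := by
    intro k hk hp
    obtain ⟨hb, ha⟩ := pal_pin _ _ _ _ _ hp
    have hb' : dg (k%10) = dg 0 := by rw [hb]; rfl
    have e1 := dg_inj (k%10) (by omega) 0 (by omega) hb'
    have e2 := dg_inj (k/10) (by omega) u0 h0 ha
    omega
  have eU1 : dg ((10*u1 + u0)/10) = dg u1 := by congr 1; omega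
  have eU2 : dg ((10*u1 + u0)%10) = dg u0 := by congr 1; omega
  have eP1 : dg ((10*u0)/10) = dg u0 := by congr 1; omega
  have eP2 : dg ((10*u0)%10) = dg 0 := by congr 1; omega
  by_cases hL : (dg u0 :: dg u1 :: t).length + 2 = 7
  · have hL5 : (dg u0 :: dg u1 :: t).length = 5 := by omega
    rw [decide_eq_true hL]
    have hbool : ∀ k, ((is_palindrome ((dg u0 :: dg u1 :: t) ++ [dg (k/10), dg (k%10)]) ||
        (!is_palindrome ((dg u0 :: dg u1 :: t) ++ [dg (k/10), dg (k%10)]) && true &&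
         is_palindrome (('0' :: dg u0 :: dg u1 :: t) ++ [dg (k/10), dg (k%10)]))))
        = (is_palindrome ((dg u0 :: dg u1 :: t) ++ [dg (k/10), dg (k%10)]) ||
           is_palindrome (('0' :: dg u0 :: dg u1 :: t) ++ [dg (k/10), dg (k%10)])) := by
      intro k
      cases hA : is_palindrome ((dg u0 :: dg u1 :: t) ++ [dg (k/10), dg (k%10)]) <;>
        cases hB : is_palindrome (('0' :: dg u0 :: dg u1 :: t) ++ [dg (k/10), dg (k%10)]) <;> rfl
    rw [List.countP_congr (fun k _ => by rw [hbool k])]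
    rw [countP_disjoint _ _ _ (by
      intro k hk hpr
      obtain ⟨hp, hr⟩ := hpr
      have e1 := pinU k (by simp at hk; omega) hp
      have e2 := pinP k (by simp at hk; omega) hr
      omega)]
    rw [countP_pin _ 100 (10*u1 + u0) (by omega) pinU,
        countP_pin _ 100 (10*u0) (by omega) pinP]
    rw [eU1, eU2, eP1, eP2, if_pos hL5]
  · have hL5 : ¬ (dg u0 :: dg u1 :: t).length = 5 := by omega
    rw [decide_eq_false hL]
    have hbool : ∀ k, ((is_palindrome ((dg u0 :: dg u1 :: t) ++ [dg (k/10), dg (k%10)]) ||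
        (!is_palindrome ((dg u0 :: dg u1 :: t) ++ [dg (k/10), dg (k%10)]) && false &&
         is_palindrome (('0' :: dg u0 :: dg u1 :: t) ++ [dg (k/10), dg (k%10)]))))
        = is_palindrome ((dg u0 :: dg u1 :: t) ++ [dg (k/10), dg (k%10)]) := by
      intro k
      cases hA : is_palindrome ((dg u0 :: dg u1 :: t) ++ [dg (k/10), dg (k%10)]) <;> rfl
    rw [List.countP_congr (fun k _ => by rw [hbool k])]
    rw [countP_pin _ 100 (10*u1 + u0) (by omega) pinU]
    rw [eU1, eU2, if_neg hL5]
    omega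

theorem count_zero (u0 u1 : Nat) (h0 : u0 < 10) (h1 : u1 < 10) (h0n : u0 ≠ 0) (t : List Char)
    (ht : t.length ≤ 2) :
    (List.range 100).countP (fun k =>
      (is_palindrome ((dg u0 :: dg u1 :: t) ++ myDigits k) ||
       (!is_palindrome ((dg u0 :: dg u1 :: t) ++ myDigits k) &&
        decide ((dg u0 :: dg u1 :: t).length + (myDigits k).length = 7) &&
        is_palindrome ('0' :: ((dg u0 :: dg u1 :: t) ++ myDigits k)))))
    = ((if is_palindrome ((dg u0 :: dg u1 :: t) ++ [dg u0]) then 1 else 0) +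
       (if u1 ≠ 0 then (if is_palindrome ((dg u0 :: dg u1 :: t) ++ [dg u1, dg u0]) then 1 else 0) else 0)) := by
  have hbool : ∀ k, k < 100 → ((is_palindrome ((dg u0 :: dg u1 :: t) ++ myDigits k) ||
      (!is_palindrome ((dg u0 :: dg u1 :: t) ++ myDigits k) &&
       decide ((dg u0 :: dg u1 :: t).length + (myDigits k).length = 7) &&
       is_palindrome ('0' :: ((dg u0 :: dg u1 :: t) ++ myDigits k)))))
      = is_palindrome ((dg u0 :: dg u1 :: t) ++ myDigits k) := by
    intro k hk
    have h7 : decide ((dg u0 :: dg u1 :: t).length + (myDigits k).length = 7) = false := by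
      apply decide_eq_false
      have := len_myDigits_le k hk
      simp only [List.length_cons]
      omega
    rw [h7]
    simp only [Bool.and_false, Bool.false_and, Bool.or_false]
  rw [List.countP_congr (fun k hk => by rw [hbool k (by simp at hk; omega)])]
  have pin : ∀ k, k < 100 → is_palindrome ((dg u0 :: dg u1 :: t) ++ myDigits k) = true →
      k = u0 ∨ (k = 10*u1 + u0 ∧ 10 ≤ k) := by
    intro k hk hp
    by_cases hk10 : k < 10
    · left
      rw [myDigits_lt k hk10] at hp
      have := pal_pin1 (dg u0) (dg u1 :: t) (dg k) hp
      exact dg_inj k (by omega) u0 h0 this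
    · right
      rw [myDigits_ge k (by omega), myDigits_lt (k/10) (by omega)] at hp
      obtain ⟨hb, ha⟩ := pal_pin _ _ _ _ _ (by
        simpa [List.cons_append] using hp)
      have e1 := dg_inj (k%10) (by omega) u0 h0 hb
      have e2 := dg_inj (k/10) (by omega) u1 h1 ha
      omega
  by_cases hu1 : u1 = 0
  · subst hu1
    have pin0 : ∀ k, k < 100 → is_palindrome ((dg u0 :: dg 0 :: t) ++ myDigits k) = true → k = u0 := by
      intro k hk hp
      rcases pin k hk hp with h | ⟨h1', h2'⟩
      · exact h
      · omega
    rw [countP_pin _ 100 u0 (by omega) pin0]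
    rw [myDigits_lt u0 h0]
    simp
  · have hK2 : 10*u1 + u0 < 100 := by omega
    have hne : u0 ≠ 10*u1 + u0 := by omega
    have hsplit : ∀ k ∈ List.range 100,
        (is_palindrome ((dg u0 :: dg u1 :: t) ++ myDigits k))
        = ((decide (k = u0) && is_palindrome ((dg u0 :: dg u1 :: t) ++ myDigits k)) ||
           (decide (k = 10*u1 + u0) && is_palindrome ((dg u0 :: dg u1 :: t) ++ myDigits k))) := by
      intro k hk
      cases hp : is_palindrome ((dg u0 :: dg u1 :: t) ++ myDigits k)
      · simp
      · rcases pin k (by simp at hk; omega) hp with h | ⟨h1', _⟩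
        · simp [h]
        · simp [h1']
    rw [List.countP_congr (fun k hk => by rw [hsplit k hk])]
    rw [countP_disjoint _ _ _ (by
      intro k hk hpr
      obtain ⟨hp, hr⟩ := hpr
      simp only [Bool.and_eq_true, decide_eq_true_eq] at hp hr
      omega)]
    rw [countP_pin _ 100 u0 (by omega) (fun k hk h => by
          simpa using (Bool.and_eq_true _ _ |>.mp h).1),
        countP_pin _ 100 (10*u1 + u0) (by omega) (fun k hk h => by
          simpa using (Bool.and_eq_true _ _ |>.mp h).1)]
    have e1 : myDigits u0 = [dg u0] := myDigits_lt u0 h0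
    have e2 : myDigits (10*u1 + u0) = [dg u1, dg u0] := by
      rw [myDigits_ge (10*u1+u0) (by omega), myDigits_lt ((10*u1+u0)/10) (by omega)]
      rw [show (10*u1+u0)/10 = u1 by omega, show (10*u1+u0)%10 = u0 by omega]
      rfl
    simp [e1, e2, hu1]
    rfl

-- digit/base abbreviations for the first two characters of the date string
def au0 (M D : Nat) : Nat := if M ≤ 9 then M else M/10
def au1 (M D : Nat) : Nat := if M ≤ 9 then D/10 else M%10
def atb (M D : Nat) : List Char := if M ≤ 9 then [dg (D%10)] else [dg (D/10), dg (D%10)]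

theorem au0_pos (M D : Nat) (h1 : 1 ≤ M) (h2 : M ≤ 12) : 1 ≤ au0 M D ∧ au0 M D < 10 := by
  unfold au0; split_ifs <;> omega

theorem au1_lt (M D : Nat) (h2 : M ≤ 12) (hd : D ≤ 31) : au1 M D < 10 := by
  unfold au1; split_ifs <;> omega

theorem atb_len (M D : Nat) : (atb M D).length ≤ 2 := by
  unfold atb; split_ifs <;> simp

theorem base_shape (M D : Nat) (h1 : 1 ≤ M) (h2 : M ≤ 12) :
    myDigits M ++ [dg (D/10), dg (D%10)] = dg (au0 M D) :: dg (au1 M D) :: atb M D := by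
  by_cases h9 : M ≤ 9
  · rw [myDigits_lt M (by omega)]
    simp [au0, au1, atb, h9]
  · rw [myDigits_ge M (by omega), myDigits_lt (M/10) (by omega)]
    simp [au0, au1, atb, h9]

def contribPos (u0 u1 : Nat) (t : List Char) : Int :=
  (if is_palindrome ((dg u0 :: dg u1 :: t) ++ [dg u1, dg u0]) then 1 else 0) +
  (if (dg u0 :: dg u1 :: t).length = 5 then
     (if is_palindrome (('0' :: dg u0 :: dg u1 :: t) ++ [dg u0, dg 0]) then 1 else 0) else 0)

def contribZero (u0 u1 : Nat) (tb : List Char) : Int :=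
  (if is_palindrome ((dg u0 :: dg u1 :: tb) ++ [dg u0]) then 1 else 0) +
  (if u1 ≠ 0 then (if is_palindrome ((dg u0 :: dg u1 :: tb) ++ [dg u1, dg u0]) then 1 else 0) else 0)

theorem pyRange_century (c : Int) :
    PySem.List.pyRange c (c+100) = (List.range 100).map (fun k : Nat => c + (k:Int)) := by
  simp [PySem.List.pyRange]

theorem body_if (s : List Char) (acc : Int) :
    (if is_palindrome s then acc + 1
     else if !is_palindrome s && PySem.List.len s == 7 then
       (if is_palindrome ('0' :: s) then acc + 1 else acc)
     else acc)
    = (if (is_palindrome s || (!is_palindrome s && PySem.List.len s == 7 && is_palindrome ('0' :: s))) then acc + 1 else acc) := by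
  rcases Bool.eq_false_or_eq_true (is_palindrome s) with h1 | h1 <;>
    rcases Bool.eq_false_or_eq_true (PySem.List.len s == (7:Int)) with h2 | h2 <;>
      rcases Bool.eq_false_or_eq_true (is_palindrome ('0' :: s)) with h3 | h3 <;>
        simp [h1, h2, h3]

theorem pcInner_eval_pos (M D Q : Nat) (acc : Int) (hm1 : 1 ≤ M) (hm2 : M ≤ 12) (hd1 : 1 ≤ D)
    (hd2 : D ≤ 31) (hq : 1 ≤ Q) :
    pcInner (100*(Q:Int)) (M:Int) (D:Int) acc
      = acc + contribPos (au0 M D) (au1 M D) (atb M D ++ myDigits Q) := by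
  unfold pcInner
  simp only [body_if]
  rw [pyRange_century, List.foldl_map]
  rw [show (fun (acc : Int) (k : Nat) =>
        if (is_palindrome (PySem.Int.toChars (M:Int) ++
              (if 1 ≤ (D:Int) && (D:Int) ≤ 9 then '0' :: PySem.Int.toChars (D:Int) else PySem.Int.toChars (D:Int)) ++
              PySem.Int.toChars (100*(Q:Int) + (k:Int))) ||
            (!is_palindrome (PySem.Int.toChars (M:Int) ++
              (if 1 ≤ (D:Int) && (D:Int) ≤ 9 then '0' :: PySem.Int.toChars (D:Int) else PySem.Int.toChars (D:Int)) ++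
              PySem.Int.toChars (100*(Q:Int) + (k:Int))) &&
             PySem.List.len (PySem.Int.toChars (M:Int) ++
              (if 1 ≤ (D:Int) && (D:Int) ≤ 9 then '0' :: PySem.Int.toChars (D:Int) else PySem.Int.toChars (D:Int)) ++
              PySem.Int.toChars (100*(Q:Int) + (k:Int))) == 7 &&
             is_palindrome ('0' :: (PySem.Int.toChars (M:Int) ++
              (if 1 ≤ (D:Int) && (D:Int) ≤ 9 then '0' :: PySem.Int.toChars (D:Int) else PySem.Int.toChars (D:Int)) ++
              PySem.Int.toChars (100*(Q:Int) + (k:Int)))))) then acc + 1 else acc)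
      = (fun (acc : Int) (k : Nat) => if condA (M:Int) (D:Int) (100*(Q:Int) + (k:Int)) then acc + 1 else acc) from rfl]
  rw [PySem.List.foldl_count_if]
  rw [List.countP_congr (fun k hk => by
    rw [show (100*(Q:Int) + (k:Int)) = ((100*Q+k : Nat) : Int) by push_cast; ring,
        cond_eval M D Q k hm1 hm2 hd1 hd2 hq (List.mem_range.mp hk)])]
  have hb : myDigits M ++ ([dg (D/10), dg (D%10)] ++ myDigits Q)
      = dg (au0 M D) :: dg (au1 M D) :: (atb M D ++ myDigits Q) := by
    rw [← List.append_assoc, base_shape M D hm1 hm2]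
    rfl
  rw [hb]
  obtain ⟨ha1, ha2⟩ := au0_pos M D hm1 hm2
  rw [count_core (au0 M D) (au1 M D) ha2 (au1_lt M D hm2 hd2) (by omega) _]
  unfold contribPos
  push_cast
  ring

theorem pcInner_eval_zero (M D : Nat) (acc : Int) (hm1 : 1 ≤ M) (hm2 : M ≤ 12) (hd1 : 1 ≤ D)
    (hd2 : D ≤ 31) :
    pcInner 0 (M:Int) (D:Int) acc = acc + contribZero (au0 M D) (au1 M D) (atb M D) := by
  unfold pcInner
  simp only [body_if]
  rw [show (0:Int) + 100 = 0 + 100 from rfl, pyRange_century, List.foldl_map]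
  rw [show (fun (acc : Int) (k : Nat) =>
        if (is_palindrome (PySem.Int.toChars (M:Int) ++
              (if 1 ≤ (D:Int) && (D:Int) ≤ 9 then '0' :: PySem.Int.toChars (D:Int) else PySem.Int.toChars (D:Int)) ++
              PySem.Int.toChars ((0:Int) + (k:Int))) ||
            (!is_palindrome (PySem.Int.toChars (M:Int) ++
              (if 1 ≤ (D:Int) && (D:Int) ≤ 9 then '0' :: PySem.Int.toChars (D:Int) else PySem.Int.toChars (D:Int)) ++
              PySem.Int.toChars ((0:Int) + (k:Int))) &&
             PySem.List.len (PySem.Int.toChars (M:Int) ++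
              (if 1 ≤ (D:Int) && (D:Int) ≤ 9 then '0' :: PySem.Int.toChars (D:Int) else PySem.Int.toChars (D:Int)) ++
              PySem.Int.toChars ((0:Int) + (k:Int))) == 7 &&
             is_palindrome ('0' :: (PySem.Int.toChars (M:Int) ++
              (if 1 ≤ (D:Int) && (D:Int) ≤ 9 then '0' :: PySem.Int.toChars (D:Int) else PySem.Int.toChars (D:Int)) ++
              PySem.Int.toChars ((0:Int) + (k:Int)))))) then acc + 1 else acc)
      = (fun (acc : Int) (k : Nat) => if condA (M:Int) (D:Int) ((0:Int) + (k:Int)) then acc + 1 else acc) from rfl]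
  rw [PySem.List.foldl_count_if]
  rw [List.countP_congr (fun k hk => by
    rw [show ((0:Int) + (k:Int)) = ((k : Nat) : Int) by push_cast; ring,
        cond_eval0 M D k hm1 hm2 hd1 hd2 (List.mem_range.mp hk)])]
  rw [show myDigits M ++ [dg (D/10), dg (D%10)] = dg (au0 M D) :: dg (au1 M D) :: atb M D from
    base_shape M D hm1 hm2]
  obtain ⟨ha1, ha2⟩ := au0_pos M D hm1 hm2
  rw [count_zero (au0 M D) (au1 M D) ha2 (au1_lt M D hm2 hd2) (by omega) _ (atb_len M D)]
  unfold contribZero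
  push_cast
  ring

theorem pal_cons_false (u0 u1 : Nat) (h0 : u0 < 10) (h1 : u1 < 10) (hu1 : u1 ≠ 0) (t : List Char) :
    is_palindrome ((dg u0 :: dg u1 :: t) ++ [dg 0, dg u0]) = false := by
  cases hp : is_palindrome ((dg u0 :: dg u1 :: t) ++ [dg 0, dg u0])
  · rfl
  · obtain ⟨hb, ha⟩ := pal_pin _ _ _ _ _ hp
    exact absurd (dg_inj 0 (by omega) u1 h1 ha) (by omega)

theorem bbody_pos (u0 u1 Q : Nat) (tb : List Char) (h0n : 1 ≤ u0) (h0 : u0 < 10) (h1 : u1 < 10)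
    (hq : 1 ≤ Q) (acc : Int) :
    (let base : List Char := dg u0 :: dg u1 :: tb
     let y1 := 100*(Q:Int) + (u0:Int)
     let y2 := 100*(Q:Int) + 10 * (u1:Int) + (u0:Int)
     let s1 := base ++ PySem.Int.toChars y1
     let acc1 := if s1 == s1.reverse then acc + 1 else acc
     let acc2 := if y2 != y1 then
         (let s2 := base ++ PySem.Int.toChars y2
          if s2 == s2.reverse then acc1 + 1 else acc1)
       else acc1
     let s3 := base ++ PySem.Int.toChars (100*(Q:Int) + 10 * (u0:Int))
     if PySem.List.len s3 == 7 then
       (let s4 := '0' :: s3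
        if s4 == s4.reverse then acc2 + 1 else acc2)
     else acc2)
    = acc + contribPos u0 u1 (tb ++ myDigits Q) := by
  have hy1 : PySem.Int.toChars (100*(Q:Int) + (u0:Int)) = myDigits Q ++ [dg 0, dg u0] := by
    rw [show (100*(Q:Int) + (u0:Int)) = ((100*Q + u0 : Nat) : Int) by push_cast; ring,
        toChars_natCast, myDigits_century Q u0 hq (by omega),
        show u0/10 = 0 by omega, show u0%10 = u0 by omega]
  have hy2 : PySem.Int.toChars (100*(Q:Int) + 10*(u1:Int) + (u0:Int)) = myDigits Q ++ [dg u1, dg u0] := by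
    rw [show (100*(Q:Int) + 10*(u1:Int) + (u0:Int)) = ((100*Q + (10*u1+u0) : Nat) : Int) by push_cast; ring,
        toChars_natCast, myDigits_century Q (10*u1+u0) hq (by omega),
        show (10*u1+u0)/10 = u1 by omega, show (10*u1+u0)%10 = u0 by omega]
  have hy3 : PySem.Int.toChars (100*(Q:Int) + 10*(u0:Int)) = myDigits Q ++ [dg u0, dg 0] := by
    rw [show (100*(Q:Int) + 10*(u0:Int)) = ((100*Q + 10*u0 : Nat) : Int) by push_cast; ring,
        toChars_natCast, myDigits_century Q (10*u0) hq (by omega),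
        show (10*u0)/10 = u0 by omega, show (10*u0)%10 = 0 by omega]
  have hne : ((100*(Q:Int) + 10*(u1:Int) + (u0:Int)) != (100*(Q:Int) + (u0:Int))) = decide (u1 ≠ 0) := by
    rw [bne, beq_decide, ← decide_not]
    exact decide_eq_decide.mpr (by omega)
  have hlen : (PySem.List.len ((dg u0 :: dg u1 :: tb) ++ (myDigits Q ++ [dg u0, dg 0])) == (7:Int))
      = decide ((dg u0 :: dg u1 :: (tb ++ myDigits Q)).length = 5) := by
    rw [show PySem.List.len ((dg u0 :: dg u1 :: tb) ++ (myDigits Q ++ [dg u0, dg 0]))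
        = ((((dg u0 :: dg u1 :: tb) ++ (myDigits Q ++ [dg u0, dg 0])).length : Nat) : Int) by
      simp [PySem.List.len_eq]]
    rw [natCast_beq7]
    refine decide_eq_decide.mpr ?_
    simp only [List.length_append, List.length_cons, List.length_nil]
    omega
  simp only [hy1, hy2, hy3, hne, hlen]
  unfold contribPos
  have hs1pal : ∀ h : u1 ≠ 0,
      (((dg u0 :: dg u1 :: tb) ++ (myDigits Q ++ [dg 0, dg u0])) ==
       ((dg u0 :: dg u1 :: tb) ++ (myDigits Q ++ [dg 0, dg u0])).reverse) = false := by
    intro h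
    have := pal_cons_false u0 u1 h0 h1 h (tb ++ myDigits Q)
    simpa [is_palindrome, List.cons_append, List.append_assoc] using this
  by_cases hu1 : u1 = 0
  · subst hu1
    simp only [show (decide ((0:Nat) ≠ 0)) = false from by simp, Bool.false_eq_true, if_false,
      is_palindrome, List.cons_append, List.append_assoc, decide_eq_true_eq]
    split_ifs <;> omega
  · have hfix := hs1pal hu1
    simp only [is_palindrome, List.cons_append, List.append_assoc] at hfix
    simp only [show (decide (u1 ≠ 0)) = true from by simp [hu1], is_palindrome,
      List.cons_append, List.append_assoc, decide_eq_true_eq]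
    simp only [hfix, Bool.false_eq_true, if_false, eq_self_iff_true, if_true]
    split_ifs <;> try omega
    all_goals simp_all

theorem bbody_zero (u0 u1 : Nat) (tb : List Char) (h0n : 1 ≤ u0) (h0 : u0 < 10) (h1 : u1 < 10)
    (htb : tb.length ≤ 2) (acc : Int) :
    (let base : List Char := dg u0 :: dg u1 :: tb
     let y1 := (0:Int) + (u0:Int)
     let y2 := (0:Int) + 10 * (u1:Int) + (u0:Int)
     let s1 := base ++ PySem.Int.toChars y1
     let acc1 := if s1 == s1.reverse then acc + 1 else acc
     let acc2 := if y2 != y1 then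
         (let s2 := base ++ PySem.Int.toChars y2
          if s2 == s2.reverse then acc1 + 1 else acc1)
       else acc1
     let s3 := base ++ PySem.Int.toChars ((0:Int) + 10 * (u0:Int))
     if PySem.List.len s3 == 7 then
       (let s4 := '0' :: s3
        if s4 == s4.reverse then acc2 + 1 else acc2)
     else acc2)
    = acc + contribZero u0 u1 tb := by
  have hy1 : PySem.Int.toChars ((0:Int) + (u0:Int)) = [dg u0] := by
    rw [show ((0:Int) + (u0:Int)) = ((u0 : Nat) : Int) by push_cast; ring,
        toChars_natCast, myDigits_lt u0 h0]
  have hy2 : PySem.Int.toChars ((0:Int) + 10*(u1:Int) + (u0:Int)) = myDigits (10*u1+u0) := by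
    rw [show ((0:Int) + 10*(u1:Int) + (u0:Int)) = ((10*u1+u0 : Nat) : Int) by push_cast; ring,
        toChars_natCast]
  have hy3 : PySem.Int.toChars ((0:Int) + 10*(u0:Int)) = [dg u0, dg 0] := by
    rw [show ((0:Int) + 10*(u0:Int)) = ((10*u0 : Nat) : Int) by push_cast; ring,
        toChars_natCast, myDigits_ge (10*u0) (by omega), myDigits_lt ((10*u0)/10) (by omega),
        show (10*u0)/10 = u0 by omega, show (10*u0)%10 = 0 by omega]
    rfl
  have hne : (((0:Int) + 10*(u1:Int) + (u0:Int)) != ((0:Int) + (u0:Int))) = decide (u1 ≠ 0) := by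
    rw [bne, beq_decide, ← decide_not]
    exact decide_eq_decide.mpr (by omega)
  have hlen : (PySem.List.len ((dg u0 :: dg u1 :: tb) ++ [dg u0, dg 0]) == (7:Int)) = false := by
    rw [show PySem.List.len ((dg u0 :: dg u1 :: tb) ++ [dg u0, dg 0])
        = ((((dg u0 :: dg u1 :: tb) ++ [dg u0, dg 0]).length : Nat) : Int) by
      simp [PySem.List.len_eq]]
    rw [natCast_beq7]
    refine decide_eq_false ?_
    simp only [List.length_append, List.length_cons, List.length_nil]
    omega
  simp only [hy1, hy2, hy3, hne, hlen]
  unfold contribZero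
  by_cases hu1 : u1 = 0
  · subst hu1
    simp only [show (decide ((0:Nat) ≠ 0)) = false from by simp, Bool.false_eq_true, if_false,
      is_palindrome, List.cons_append, List.append_assoc]
    split_ifs <;> omega
  · have e2 : myDigits (10*u1+u0) = [dg u1, dg u0] := by
      rw [myDigits_ge (10*u1+u0) (by omega), myDigits_lt ((10*u1+u0)/10) (by omega),
          show (10*u1+u0)/10 = u1 by omega, show (10*u1+u0)%10 = u0 by omega]
      rfl
    rw [e2]
    simp only [show (decide (u1 ≠ 0)) = true from by simp [hu1], is_palindrome,
      List.cons_append, List.append_assoc, eq_self_iff_true, if_true]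
    split_ifs <;> try omega
    all_goals simp_all

theorem months_map : PySem.List.pyRange 1 13 = (PySem.List.pyRange 0 12).map (· + 1) := by decide

theorem days_le (L : List Int) (hL : L = [31, 29, 31, 30, 31, 30, 31, 31, 30, 31, 30, 31] ∨
    L = [31, 28, 31, 30, 31, 30, 31, 31, 30, 31, 30, 31]) (mo : Int) (h0 : 0 ≤ mo) (h12 : mo < 12) :
    1 ≤ PySem.List.pyGetD L mo 0 ∧ PySem.List.pyGetD L mo 0 ≤ 31 := by
  have hmem : PySem.List.pyGetD L mo 0 ∈ L := by
    apply PySem.List.pyGetD_mem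
    rcases hL with rfl | rfl <;> constructor <;> simp <;> omega
  have hall : ∀ x ∈ L, 1 ≤ x ∧ x ≤ (31:Int) := by
    rcases hL with rfl | rfl <;> decide
  exact hall _ hmem

theorem uval (M D : Nat) (hm1 : 1 ≤ M) (hm2 : M ≤ 12) (hd1 : 1 ≤ D) (hd2 : D ≤ 31) :
    (if (M:Int) < 10 then ((M:Int), PySem.Int.floordiv (D:Int) 10)
     else (PySem.Int.floordiv (M:Int) 10, PySem.Int.mod (M:Int) 10))
    = (((au0 M D : Nat) : Int), ((au1 M D : Nat) : Int)) := by
  have hfd : PySem.Int.floordiv (D:Int) 10 = ((D/10 : Nat) : Int) := by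
    rw [PySem.Int.floordiv_eq_ediv_of_pos (show (0:Int) < 10 by norm_num)]; omega
  have hfm : PySem.Int.floordiv (M:Int) 10 = ((M/10 : Nat) : Int) := by
    rw [PySem.Int.floordiv_eq_ediv_of_pos (show (0:Int) < 10 by norm_num)]; omega
  have hmm : PySem.Int.mod (M:Int) 10 = ((M%10 : Nat) : Int) := by
    rw [PySem.Int.mod_eq_emod_of_pos (show (0:Int) < 10 by norm_num)]; omega
  by_cases h9 : M ≤ 9
  · rw [if_pos (by exact_mod_cast (by omega : (M:Int) < 10)), hfd]
    simp [au0, au1, h9]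
  · rw [if_neg (by push_cast; omega), hfm, hmm]
    simp [au0, au1, h9]

theorem step_eq (M D Q : Nat) (acc : Int) (hm1 : 1 ≤ M) (hm2 : M ≤ 12) (hd1 : 1 ≤ D)
    (hd2 : D ≤ 31) :
    pcInner (100*(Q:Int)) (M:Int) (D:Int) acc =
    (let dd := if (D:Int) ≥ 10 then PySem.Int.toChars (D:Int) else '0' :: PySem.Int.toChars (D:Int)
     let base := PySem.Int.toChars (M:Int) ++ dd
     let u := if (M:Int) < 10 then ((M:Int), PySem.Int.floordiv (D:Int) 10)
              else (PySem.Int.floordiv (M:Int) 10, PySem.Int.mod (M:Int) 10)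
     let y1 := 100*(Q:Int) + u.1
     let y2 := 100*(Q:Int) + 10 * u.2 + u.1
     let s1 := base ++ PySem.Int.toChars y1
     let acc1 := if s1 == s1.reverse then acc + 1 else acc
     let acc2 := if y2 != y1 then
         (let s2 := base ++ PySem.Int.toChars y2
          if s2 == s2.reverse then acc1 + 1 else acc1)
       else acc1
     let s3 := base ++ PySem.Int.toChars (100*(Q:Int) + 10 * u.1)
     if PySem.List.len s3 == 7 then
       (let s4 := '0' :: s3
        if s4 == s4.reverse then acc2 + 1 else acc2)
     else acc2) := by
  obtain ⟨ha1, ha2⟩ := au0_pos M D hm1 hm2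
  have ha3 := au1_lt M D hm2 hd2
  have hbase : PySem.Int.toChars (M:Int) ++
      (if (D:Int) ≥ 10 then PySem.Int.toChars (D:Int) else '0' :: PySem.Int.toChars (D:Int))
      = dg (au0 M D) :: dg (au1 M D) :: atb M D := by
    rw [day2B D hd1 hd2, toChars_natCast M, base_shape M D hm1 hm2]
  simp only [hbase, uval M D hm1 hm2 hd1 hd2]
  rcases Nat.eq_zero_or_pos Q with hQ0 | hQpos
  · subst hQ0
    rw [show (100*((0:Nat):Int)) = (0:Int) by norm_num]
    rw [pcInner_eval_zero M D acc hm1 hm2 hd1 hd2]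
    rw [← bbody_zero (au0 M D) (au1 M D) (atb M D) ha1 ha2 ha3 (atb_len M D) acc]
  · rw [pcInner_eval_pos M D Q acc hm1 hm2 hd1 hd2 hQpos]
    rw [← bbody_pos (au0 M D) (au1 M D) Q (atb M D) ha1 ha2 ha3 hQpos acc]

theorem ab_eq (year : Int) (h1 : 0 ≤ year) :
    palindrome_count year = palindrome_count_alt year := by
  obtain ⟨Q, hQ⟩ : ∃ Q : Nat, year / 100 = (Q:Int) := ⟨(year / 100).toNat, by omega⟩
  have hc : year - PySem.Int.mod year 100 = 100 * ((Q:Nat) : Int) := by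
    rw [PySem.Int.mod_eq_emod_of_pos (show (0:Int) < 100 by norm_num)]; omega
  unfold palindrome_count palindrome_count_alt
  simp only [hc]
  rcases Bool.eq_false_or_eq_true (PySem.Int.mod year 4 == 0 && PySem.Int.mod year 400 != 0) with hb | hb <;>
    simp only [is_leap, hb, if_true, if_false, Bool.false_eq_true, Bool.true_eq_false] <;>
    rw [months_map, List.foldl_map] <;>
    (apply PySem.List.foldl_congr_mem; intro acc mo hmo;
     obtain ⟨hmo0, hmo12⟩ := PySem.List.mem_pyRange_one.mp hmo;
     simp only [add_sub_cancel_right];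
     apply PySem.List.foldl_congr_mem; intro acc2 d hd;
     obtain ⟨hd1, hd2'⟩ := PySem.List.mem_pyRange_one.mp hd)
  · have hD := days_le _ (Or.inl rfl) mo hmo0 hmo12
    obtain ⟨M, hM⟩ : ∃ Mn : Nat, mo + 1 = (Mn:Int) := ⟨(mo+1).toNat, by omega⟩
    obtain ⟨D, hDc⟩ : ∃ Dn : Nat, d = (Dn:Int) := ⟨d.toNat, by omega⟩
    rw [hM, hDc]
    exact step_eq M D Q acc2 (by omega) (by omega) (by omega) (by omega)
  · have hD := days_le _ (Or.inr rfl) mo hmo0 hmo12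
    obtain ⟨M, hM⟩ : ∃ Mn : Nat, mo + 1 = (Mn:Int) := ⟨(mo+1).toNat, by omega⟩
    obtain ⟨D, hDc⟩ : ∃ Dn : Nat, d = (Dn:Int) := ⟨d.toNat, by omega⟩
    rw [hM, hDc]
    exact step_eq M D Q acc2 (by omega) (by omega) (by omega) (by omega)

-- ===== VERDICT (by name: the statement is the Claim_ definition above) =====
theorem palindrome_count_spec : Claim_equal_palindrome_count := by
  intro year _ hPre
  exact ab_eq year hPre
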